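/- GENERATED by tools/from_farm_form.py from prooffarm-gif/accepted/DGifBufferedInput.2/Proof.lean (a worked proof of the farm's unit `DGifBufferedInput.2`,
   accepted by the verdict) — do not edit. -/
import Gif.Spec.Units.DGifBufferedInput_2
import Gif.Spec.AllSegs
import Gif.Spec.Proved.DGifBufferedInput_2_Lemmas

open X86 X86.User Asan ProgX.Base ProgX.Base.Spec Gif.Spec

/-!
  `DGifBufferedInput.2` (0x1065a8 … 0x1065fe, 22 instructions; dgif_lib.c:1123-1134): A BODY SEGMENT OF AN UNPROTECTED FUNCTION WITH A
  CALL IN THE MIDDLE. The return address 0x1065b8 (`ret5`) of `InternalRead(gif, Buf, 1)` is not a cut of the design, so the unit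
  makes it one of its own: the private assertion `bi2_AtRet5` (`Body` + the count in `eax`) and two walks (Lemmas.lean), chained here.
-/

/-- Segment 2 of `DGifBufferedInput` takes `Refill` at 0x1065a8 to `Done` at 0x10659d (a read error, an empty sub-block) or to
`AfterLen` at 0x1065fe (the length byte was read and is not 0). -/
theorem Gif.Spec.Proved.DGifBufferedInput_2_ok : Gif.Spec.DGifBufferedInput_2.Statement := by
  intro Lay hLay μ hμ u₀ hcode h_InternalRead h_asan_load1_noabort h_asan_store4_noabort H rest frames F R e ret v hat
  -- the callee's contract for the function's own frame list (no protected frame) and the request of 1 byte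
  have hir := h_InternalRead H rest frames F R 1
  -- 0x1065a8 … the call … 0x1065b8
  refine (Gif.Spec.DGifBufferedInput_2.bi2_seg_call Lay hLay μ hμ u₀ hcode H rest frames F R e ret hir v hat).trans ?_
  -- 0x1065b8 … 0x10659d / 0x1065fe
  intro v1 hv1
  exact Gif.Spec.DGifBufferedInput_2.bi2_seg_tail Lay hLay μ hμ u₀ hcode H rest frames F R e ret h_asan_load1_noabort
    h_asan_store4_noabort v1 hv1
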